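-- pv_equiv track=rewrite | github.com/omgupta2202/SubTracker | backend/modules/subtracker/services/recurring_detector.py | _best_display_name
-- ===== SOURCE A (Python) =====
-- from typing import Dict, List, Optional
--
-- def _best_display_name(txns: List[dict]) -> str:
--     """Prefer merchant; fallback to description; title-case the result."""
--     for t in txns:
--         if t.get("merchant"):
--             return str(t["merchant"]).strip().title()
--     for t in txns:
--         if t.get("description"):
--             return str(t["description"]).strip().title()
--     return "Recurring charge"
-- ===== SOURCE B (Python) =====
-- def _best_display_name(txns):
--     """One pass over txns holding two first-hit slots; format at the end."""
--     first_merchant = None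
--     first_description = None
--     for t in txns:
--         if first_merchant is None and t.get("merchant"):
--             first_merchant = t["merchant"]
--         if first_description is None and t.get("description"):
--             first_description = t["description"]
--     if first_merchant is not None:
--         return str(first_merchant).strip().title()
--     if first_description is not None:
--         return str(first_description).strip().title()
--     return "Recurring charge"
-- ===== Notes on version B (the rewrite author's own statement) =====
-- stated objective: alternative
-- what changed: Replaces A's two sequential scans (each with an early return) by a single traversal that fills two first-hit candidate slots and formats the chosen one after the loop.
import Mathlib
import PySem

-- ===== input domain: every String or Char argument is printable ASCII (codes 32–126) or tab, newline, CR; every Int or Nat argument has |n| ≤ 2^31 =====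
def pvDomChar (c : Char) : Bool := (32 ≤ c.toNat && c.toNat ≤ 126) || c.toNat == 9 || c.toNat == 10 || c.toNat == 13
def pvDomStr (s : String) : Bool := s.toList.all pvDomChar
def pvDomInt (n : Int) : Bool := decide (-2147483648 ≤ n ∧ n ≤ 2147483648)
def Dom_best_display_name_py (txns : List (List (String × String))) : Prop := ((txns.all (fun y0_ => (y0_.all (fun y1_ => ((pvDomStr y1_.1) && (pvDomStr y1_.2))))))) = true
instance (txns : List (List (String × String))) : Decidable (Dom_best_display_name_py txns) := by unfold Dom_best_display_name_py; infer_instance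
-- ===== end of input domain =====

-- ===== PORT A =====
-- A scans twice: first for a truthy "merchant", then for a truthy "description".
-- Python str.title() ported by hand over the char list (exact on ASCII: a letter is
-- uppercased iff the previous character is not a letter; non-letters are kept).
def pvTitleChars : Bool → List Char → List Char
  | _, [] => []
  | prevAlpha, c :: cs =>
    if c.isAlpha then
      (if prevAlpha then c.toLower else c.toUpper) :: pvTitleChars true cs
    else c :: pvTitleChars false cs

def pvTitle (s : String) : String := String.mk (pvTitleChars false s.toList)

def pvScanMerchant : List (List (String × String)) → Option String
  | [] => none
  | t :: rest =>
    if PySem.Dict.getD (PySem.Dict.mk t) "merchant" "" ≠ "" then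
      some (pvTitle (PySem.Str.strip (PySem.Dict.getD (PySem.Dict.mk t) "merchant" "")))
    else pvScanMerchant rest

def pvScanDescription : List (List (String × String)) → Option String
  | [] => none
  | t :: rest =>
    if PySem.Dict.getD (PySem.Dict.mk t) "description" "" ≠ "" then
      some (pvTitle (PySem.Str.strip (PySem.Dict.getD (PySem.Dict.mk t) "description" "")))
    else pvScanDescription rest

def best_display_name_py (txns : List (List (String × String))) : String :=
  match pvScanMerchant txns with
  | some r => r
  | none =>
    match pvScanDescription txns with
    | some r => r
    | none => "Recurring charge"

-- ===== PORT B =====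
-- B: one fold over txns maintaining two first-hit slots, formatting afterwards.
def pvStep (st : Option String × Option String) (t : List (String × String)) :
    Option String × Option String :=
  let m := if st.1 = none ∧ PySem.Dict.getD (PySem.Dict.mk t) "merchant" "" ≠ "" then
             some (PySem.Dict.getD (PySem.Dict.mk t) "merchant" "") else st.1
  let d := if st.2 = none ∧ PySem.Dict.getD (PySem.Dict.mk t) "description" "" ≠ "" then
             some (PySem.Dict.getD (PySem.Dict.mk t) "description" "") else st.2
  (m, d)

def best_display_name_py_alt (txns : List (List (String × String))) : String :=
  match txns.foldl pvStep (none, none) with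
  | (some v, _) => pvTitle (PySem.Str.strip v)
  | (none, some v) => pvTitle (PySem.Str.strip v)
  | (none, none) => "Recurring charge"

-- ===== PRECONDITION & SPEC =====
def Spec_best_display_name_py (txns : List (List (String × String))) (out : String) : Prop := out = best_display_name_py_alt txns
instance (txns : List (List (String × String))) (out : String) : Decidable (Spec_best_display_name_py txns out) := by unfold Spec_best_display_name_py; infer_instance

-- ===== CLAIM =====
def Claim_equal_best_display_name_py : Prop := ∀ (txns : List (List (String × String))), Dom_best_display_name_py txns → Spec_best_display_name_py txns (best_display_name_py txns)

-- ===== LEMMAS AND PROOFS =====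
-- raw first-hit scans used to relate the two ports
def pvRawM : List (List (String × String)) → Option String
  | [] => none
  | t :: rest =>
    if PySem.Dict.getD (PySem.Dict.mk t) "merchant" "" ≠ "" then
      some (PySem.Dict.getD (PySem.Dict.mk t) "merchant" "")
    else pvRawM rest

def pvRawD : List (List (String × String)) → Option String
  | [] => none
  | t :: rest =>
    if PySem.Dict.getD (PySem.Dict.mk t) "description" "" ≠ "" then
      some (PySem.Dict.getD (PySem.Dict.mk t) "description" "")
    else pvRawD rest

theorem pvScanMerchant_eq (txns : List (List (String × String))) :
    pvScanMerchant txns = (pvRawM txns).map (fun v => pvTitle (PySem.Str.strip v)) := by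
  induction txns with
  | nil => rfl
  | cons t rest ih =>
    simp only [pvScanMerchant, pvRawM]
    split_ifs <;> simp [ih]

theorem pvScanDescription_eq (txns : List (List (String × String))) :
    pvScanDescription txns = (pvRawD txns).map (fun v => pvTitle (PySem.Str.strip v)) := by
  induction txns with
  | nil => rfl
  | cons t rest ih =>
    simp only [pvScanDescription, pvRawD]
    split_ifs <;> simp [ih]

theorem pvFoldl_step (txns : List (List (String × String))) (m d : Option String) :
    txns.foldl pvStep (m, d) = (m.orElse (fun _ => pvRawM txns), d.orElse (fun _ => pvRawD txns)) := by
  induction txns generalizing m d with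
  | nil => cases m <;> cases d <;> rfl
  | cons t rest ih =>
    simp only [List.foldl, pvStep, pvRawM, pvRawD]
    cases m <;> cases d <;> split_ifs <;> simp_all

-- ===== VERDICT =====
theorem best_display_name_py_spec : Claim_equal_best_display_name_py := by
  intro txns _
  unfold Spec_best_display_name_py best_display_name_py best_display_name_py_alt
  rw [pvFoldl_step, pvScanMerchant_eq, pvScanDescription_eq]
  cases pvRawM txns <;> cases pvRawD txns <;> rfl
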